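-- pv_equiv track=rewrite | github.com/rhollings/Python3 | play/alphabet_soup.py | alphabet_soup
-- ===== SOURCE A (Python) =====
-- def alphabet_soup(string):
--   li = sorted(list(string)) #sorts string into list
--   lower_let = sorted(list(string.lower())) #sorts the lowercase letters
--   caps = []
--   new_string = ''
--
--   for char in li:
--     if char.isupper(): #sort uppercase
--       caps.append(char)
--
--   for letter in lower_let:
--     if caps.count(letter.upper()) != 0:
--       new_string += letter.upper()  #puts string back together
--       caps.pop(caps.index(letter.upper()))
--     else:
--       new_string += letter
--
--   return new_string
-- ===== SOURCE B (Python) =====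
-- def alphabet_soup(string):
--     return ''.join(sorted(string, key=lambda c: (c.lower(), c.islower())))
-- ===== Notes on version B (the rewrite author's own statement) =====
-- stated objective: simpler
-- what changed: A does two staged passes, collecting uppercase letters into a list and consuming it with count/index/pop scans while walking the sorted lowered string; B is a one-liner: one stable sort of the original characters under the composite key (c.lower(), c.islower()), with no caps collection or consumption at all.
import Mathlib
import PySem

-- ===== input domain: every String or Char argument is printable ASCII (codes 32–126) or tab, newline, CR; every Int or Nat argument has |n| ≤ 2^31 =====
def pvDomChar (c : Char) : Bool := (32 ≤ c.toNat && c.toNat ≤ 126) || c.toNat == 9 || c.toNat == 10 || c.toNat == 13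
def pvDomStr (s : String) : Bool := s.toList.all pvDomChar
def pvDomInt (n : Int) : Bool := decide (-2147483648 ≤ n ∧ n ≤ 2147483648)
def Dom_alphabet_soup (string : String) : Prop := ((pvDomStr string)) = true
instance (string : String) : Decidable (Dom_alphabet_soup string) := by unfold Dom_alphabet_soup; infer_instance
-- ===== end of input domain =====

-- B replaces A's two staged passes with a consumable caps list (count/index/pop scans)
-- by ONE stable sort under the composite key (c.lower(), c.islower()) (objective: simpler).

-- ===== PORT A =====
-- caps.pop(caps.index(x)) removes the element at the first index of x; the '.getD 0' fallback
-- of index? is unreachable (guarded by caps.count x != 0) and only makes the step total.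
def alphabet_soup (string : String) : String :=
  let li := PySem.List.sorted string.toList (fun x => x) false
  let lower_let := PySem.List.sorted (PySem.Chars.lower string.toList) (fun x => x) false
  let caps : List Char := li.foldl (fun caps c => if PySem.Chars.isupper c then caps ++ [c] else caps) []
  let st := lower_let.foldl (fun (st : List Char × List Char) letter =>
      if PySem.List.count st.1 (PySem.Chars.upperChar letter) ≠ 0 then
        (st.1.eraseIdx ((PySem.List.index? st.1 (PySem.Chars.upperChar letter)).getD 0),
         st.2 ++ [PySem.Chars.upperChar letter])
      else
        (st.1, st.2 ++ [letter])) (caps, [])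
  String.mk st.2

-- ===== PORT B =====
-- sorted(string, key=lambda c: (c.lower(), c.islower())) — tuple key, so PySem.List.sorted2;
-- c.lower() of one ASCII char is one char, so the 1-char-string first component compares
-- exactly like the Char lowerChar c; islower() is the Bool with Python's False < True.
def alphabet_soup_alt (string : String) : String :=
  String.mk (PySem.List.sorted2 string.toList
    (fun c => PySem.Chars.lowerChar c) (fun c => PySem.Chars.islower c) false)

-- ===== PRECONDITION & SPEC =====
def Spec_alphabet_soup (string : String) (out : String) : Prop := out = alphabet_soup_alt string
instance (string : String) (out : String) : Decidable (Spec_alphabet_soup string out) := by unfold Spec_alphabet_soup; infer_instance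

-- ===== CLAIM (what is proved, stated in full; the proofs are below) =====
def Claim_equal_alphabet_soup : Prop := ∀ (string : String), Dom_alphabet_soup string → Spec_alphabet_soup string (alphabet_soup string)

-- ===== LEMMAS AND PROOFS =====

-- Numeric views of the ASCII character primitives (all by interval reasoning on toNat).
theorem char_eq_iff (a b : Char) : a = b ↔ a.toNat = b.toNat := by
  constructor
  · intro h; rw [h]
  · intro h; apply Char.ext; exact UInt32.toNat_inj.mp h

theorem char_le_iff (a b : Char) : a ≤ b ↔ a.toNat ≤ b.toNat := by
  rw [Char.le_def, UInt32.le_iff_toNat_le]; rfl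

theorem char_lt_iff (a b : Char) : a < b ↔ a.toNat < b.toNat := by
  rw [Char.lt_def, UInt32.lt_iff_toNat_lt]; rfl

theorem isupper_eq (c : Char) : PySem.Chars.isupper c = decide (65 ≤ c.toNat ∧ c.toNat ≤ 90) := by
  simp [PySem.Chars.isupper, char_le_iff]

theorem islower_eq (c : Char) : PySem.Chars.islower c = decide (97 ≤ c.toNat ∧ c.toNat ≤ 122) := by
  simp [PySem.Chars.islower, char_le_iff]

theorem toNat_lowerChar (c : Char) :
    (PySem.Chars.lowerChar c).toNat = if 65 ≤ c.toNat ∧ c.toNat ≤ 90 then c.toNat + 32 else c.toNat := by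
  rw [PySem.Chars.lowerChar, isupper_eq]
  split_ifs with h1 h2 h2
  · rw [Char.toNat_ofNat, if_pos]; unfold Nat.isValidChar; omega
  · simp at h1; omega
  · simp at h1; omega
  · rfl

theorem toNat_upperChar (c : Char) :
    (PySem.Chars.upperChar c).toNat = if 97 ≤ c.toNat ∧ c.toNat ≤ 122 then c.toNat - 32 else c.toNat := by
  rw [PySem.Chars.upperChar, islower_eq]
  split_ifs with h1 h2 h2
  · rw [Char.toNat_ofNat, if_pos]; unfold Nat.isValidChar; omega
  · simp at h1; omega
  · simp at h1; omega
  · rfl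

-- The single sort key B uses, packed into one Nat: lexicographic (c.lower(), c.islower()).
def soupK (c : Char) : Nat :=
  2 * (PySem.Chars.lowerChar c).toNat + (if PySem.Chars.islower c then 1 else 0)

theorem soupK_inj : Function.Injective soupK := by
  intro a b h
  unfold soupK at h
  rw [toNat_lowerChar, toNat_lowerChar, islower_eq, islower_eq] at h
  simp only [decide_eq_true_eq] at h
  rw [char_eq_iff]
  split_ifs at h <;> omega

-- sorted2's comparator for B's key IS the comparator of sorted with key soupK.
theorem comparator_eq :
    (fun a b : Char => (decide (PySem.Chars.lowerChar a < PySem.Chars.lowerChar b) ||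
        (!decide (PySem.Chars.lowerChar b < PySem.Chars.lowerChar a) &&
         decide (PySem.Chars.islower a < PySem.Chars.islower b))))
    = fun a b => decide (soupK a < soupK b) := by
  funext a b
  rw [Bool.eq_iff_iff]
  simp only [soupK, toNat_lowerChar, islower_eq, char_lt_iff, Bool.lt_iff, Bool.or_eq_true,
    Bool.and_eq_true, Bool.not_eq_true', decide_eq_true_eq, decide_eq_false_iff_not]
  split_ifs <;> omega

theorem alt_eq_sorted (s : String) :
    alphabet_soup_alt s = String.mk (PySem.List.sorted s.toList soupK false) := by
  unfold alphabet_soup_alt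
  congr 1
  rw [PySem.List.sorted_eq_foldl_insertBy]
  show (PySem.List.sorted2 s.toList _ _ false) = _
  rw [PySem.List.sorted2, comparator_eq]
  simp

-- A's second loop as a structural recursion: walk the sorted lowered list, consuming caps.
def soupF : List Char → List Char → List Char
  | [], _ => []
  | x :: M, caps =>
    if PySem.List.count caps (PySem.Chars.upperChar x) ≠ 0 then
      PySem.Chars.upperChar x :: soupF M (caps.erase (PySem.Chars.upperChar x))
    else x :: soupF M caps

-- caps.pop(caps.index(x)) is erase-first-occurrence
theorem erase_via_index (l : List Char) (a : Char) (h : a ∈ l) :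
    l.eraseIdx ((PySem.List.index? l a).getD 0) = l.erase a := by
  induction l with
  | nil => cases h
  | cons x t ih =>
    by_cases hx : x = a
    · subst hx; rw [PySem.List.index?_cons_self]; simp
    · have ht : a ∈ t := by rcases List.mem_cons.mp h with h1 | h2; exact absurd h1.symm hx; exact h2
      obtain ⟨k, hk⟩ := Option.isSome_iff_exists.mp ((PySem.List.index?_isSome_iff t a).mpr ht)
      rw [PySem.List.index?_cons_of_ne t hx, hk]
      simp only [Option.map_some, Option.getD_some, List.eraseIdx_cons_succ]
      rw [List.erase_cons_tail (by simp [hx])]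
      have := ih ht; rw [hk] at this; simpa using this

theorem soupF_foldl (M caps acc : List Char) :
    (M.foldl (fun (st : List Char × List Char) letter =>
      if PySem.List.count st.1 (PySem.Chars.upperChar letter) ≠ 0 then
        (st.1.eraseIdx ((PySem.List.index? st.1 (PySem.Chars.upperChar letter)).getD 0),
         st.2 ++ [PySem.Chars.upperChar letter])
      else
        (st.1, st.2 ++ [letter])) (caps, acc)).2 = acc ++ soupF M caps := by
  induction M generalizing caps acc with
  | nil => simp [soupF]
  | cons x t ih =>
    simp only [List.foldl_cons, soupF]
    by_cases hc : PySem.List.count caps (PySem.Chars.upperChar x) ≠ 0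
    · have hmem : PySem.Chars.upperChar x ∈ caps := by
        simp only [PySem.List.count] at hc
        exact List.count_pos_iff.mp (Nat.pos_of_ne_zero hc)
      rw [if_pos hc, if_pos hc, erase_via_index caps _ hmem, ih]
      simp
    · rw [if_neg hc, if_neg hc, ih]
      simp

-- Multiplicities produced by the consuming walk.
theorem count_soupF (M : List Char) : ∀ caps : List Char,
    (∀ c ∈ M, PySem.Chars.isupper c = false) →
    (∀ c ∈ caps, PySem.Chars.isupper c = true) →
    (∀ U, PySem.Chars.isupper U = true →
        caps.count U ≤ M.count (PySem.Chars.lowerChar U)) →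
    ∀ X : Char,
    (soupF M caps).count X =
      if PySem.Chars.isupper X then caps.count X
      else M.count X - caps.count (PySem.Chars.upperChar X) := by
  induction M with
  | nil =>
    intro caps hM hcaps hle X
    simp only [soupF, List.count_nil]
    split_ifs with hX
    · have := hle X hX
      simp only [List.count_nil] at this
      omega
    · omega
  | cons x t ih =>
    intro caps hM hcaps hle X
    have hxu : PySem.Chars.isupper x = false := hM x List.mem_cons_self
    have htl : ∀ c ∈ t, PySem.Chars.isupper c = false :=
      fun c hcm => hM c (List.mem_cons_of_mem _ hcm)
    simp only [soupF]
    by_cases hc : PySem.List.count caps (PySem.Chars.upperChar x) ≠ 0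
    · have hmem : PySem.Chars.upperChar x ∈ caps := by
        simp only [PySem.List.count] at hc
        exact List.count_pos_iff.mp (Nat.pos_of_ne_zero hc)
      have hupx : PySem.Chars.isupper (PySem.Chars.upperChar x) = true := hcaps _ hmem
      -- an uppercase U with lowerChar U = x forces U = upperChar x
      have hforce : ∀ U : Char, PySem.Chars.isupper U = true →
          PySem.Chars.lowerChar U = x → U = PySem.Chars.upperChar x := by
        intro U hU hlU
        rw [isupper_eq] at hU hupx
        rw [char_eq_iff] at hlU ⊢
        rw [toNat_lowerChar] at hlU
        rw [toNat_upperChar]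
        rw [isupper_eq] at hxu
        simp at hU hupx hxu
        split_ifs at hlU ⊢ <;> omega
      have hcaps' : ∀ c ∈ caps.erase (PySem.Chars.upperChar x), PySem.Chars.isupper c = true :=
        fun c hcm => hcaps c (List.mem_of_mem_erase hcm)
      have hle' : ∀ U, PySem.Chars.isupper U = true →
          (caps.erase (PySem.Chars.upperChar x)).count U ≤ t.count (PySem.Chars.lowerChar U) := by
        intro U hU
        by_cases hUe : U = PySem.Chars.upperChar x
        · subst hUe
          rw [List.count_erase_self]
          have hx := hle _ hU
          have hlow : PySem.Chars.lowerChar (PySem.Chars.upperChar x) = x := by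
            rw [isupper_eq] at hupx hxu
            rw [char_eq_iff, toNat_lowerChar, toNat_upperChar]
            simp at hupx hxu
            split_ifs <;> omega
          rw [hlow] at hx ⊢
          rw [List.count_cons_self] at hx
          omega
        · rw [List.count_erase_of_ne hUe]
          have hx := hle U hU
          have hlne : PySem.Chars.lowerChar U ≠ x := fun h => hUe (hforce U hU h)
          rw [List.count_cons, if_neg (by simp only [beq_iff_eq]; exact Ne.symm hlne)] at hx
          omega
      rw [if_pos hc]
      simp only [List.count_cons]
      rw [ih _ htl hcaps' hle' X]
      by_cases hX : PySem.Chars.isupper X = true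
      · -- X uppercase
        rw [if_pos hX, if_pos hX]
        by_cases hXe : X = PySem.Chars.upperChar x
        · have hb : (PySem.Chars.upperChar x == X) = true := by simp [hXe]
          rw [hb, if_pos rfl, hXe, List.count_erase_self]
          have hpos : 0 < caps.count (PySem.Chars.upperChar x) := List.count_pos_iff.mpr hmem
          omega
        · have hb : (PySem.Chars.upperChar x == X) = false :=
            beq_eq_false_iff_ne.mpr (fun h => hXe h.symm)
          rw [List.count_erase_of_ne hXe, hb]
          simp
      · -- X not uppercase
        rw [if_neg hX, if_neg hX]
        have hb : (PySem.Chars.upperChar x == X) = false :=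
          beq_eq_false_iff_ne.mpr (fun h => hX (h ▸ hupx))
        simp only [hb, Bool.false_eq_true, if_false, add_zero]
        by_cases hXx : X = x
        · rw [hXx, List.count_erase_self, beq_self_eq_true, if_pos rfl]
          have hpos : 0 < caps.count (PySem.Chars.upperChar x) := List.count_pos_iff.mpr hmem
          have hle2 := hle _ hupx
          have hlow : PySem.Chars.lowerChar (PySem.Chars.upperChar x) = x := by
            rw [isupper_eq] at hupx
            rw [isupper_eq] at hxu
            rw [char_eq_iff, toNat_lowerChar, toNat_upperChar]
            simp at hupx hxu
            split_ifs <;> omega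
          rw [hlow, List.count_cons_self] at hle2
          omega
        · have hne : PySem.Chars.upperChar X ≠ PySem.Chars.upperChar x := by
            intro h
            apply hXx
            rw [isupper_eq] at hX hxu
            rw [char_eq_iff] at h ⊢
            rw [toNat_upperChar, toNat_upperChar] at h
            simp at hX hxu
            split_ifs at h <;> omega
          have hbx : (x == X) = false := beq_eq_false_iff_ne.mpr (fun h => hXx h.symm)
          rw [List.count_erase_of_ne hne]
          simp only [hbx, Bool.false_eq_true, if_false, add_zero]
    · have hc0 : List.count (PySem.Chars.upperChar x) caps = 0 := by
        simp only [PySem.List.count] at hc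
        omega
      have hle' : ∀ U, PySem.Chars.isupper U = true →
          caps.count U ≤ t.count (PySem.Chars.lowerChar U) := by
        intro U hU
        have hx := hle U hU
        by_cases hlU : PySem.Chars.lowerChar U = x
        · -- then U = upperChar x, which is absent from caps
          have hUe : U = PySem.Chars.upperChar x := by
            rw [isupper_eq] at hU hxu
            rw [char_eq_iff] at hlU ⊢
            rw [toNat_lowerChar] at hlU
            rw [toNat_upperChar]
            simp at hU hxu
            split_ifs at hlU ⊢ <;> omega
          rw [hUe]
          omega
        · rw [List.count_cons, if_neg (by simp only [beq_iff_eq]; exact Ne.symm hlU)] at hx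
          omega
      rw [if_neg hc]
      simp only [List.count_cons]
      rw [ih caps htl hcaps hle' X]
      by_cases hX : PySem.Chars.isupper X = true
      · rw [if_pos hX, if_pos hX]
        have hbx : (x == X) = false := by
          simp only [beq_eq_false_iff_ne]
          intro hxe; rw [hxe] at hxu; rw [hX] at hxu; cases hxu
        simp only [hbx, Bool.false_eq_true, if_false, add_zero]
      · rw [if_neg hX, if_neg hX]
        by_cases hXx : X = x
        · rw [hXx, hc0]
          simp
        · have hbx : (x == X) = false := beq_eq_false_iff_ne.mpr (fun h => hXx h.symm)
          simp only [hbx, Bool.false_eq_true, if_false, add_zero]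

-- Every element the walk emits comes from some source letter, capitalised only from caps.
theorem mem_soupF (M : List Char) : ∀ (caps : List Char) (e : Char),
    (∀ c ∈ M, PySem.Chars.isupper c = false) →
    (∀ c ∈ caps, PySem.Chars.isupper c = true) →
    e ∈ soupF M caps →
    ∃ y ∈ M, (e = PySem.Chars.upperChar y ∧ PySem.Chars.upperChar y ∈ caps) ∨ e = y := by
  induction M with
  | nil => intro caps e _ _ h; simp [soupF] at h
  | cons x t ih =>
    intro caps e hM hcaps h
    have htl : ∀ c ∈ t, PySem.Chars.isupper c = false :=
      fun c hcm => hM c (List.mem_cons_of_mem _ hcm)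
    simp only [soupF] at h
    split_ifs at h with hc
    · have hmem : PySem.Chars.upperChar x ∈ caps := by
        simp only [PySem.List.count] at hc
        exact List.count_pos_iff.mp (Nat.pos_of_ne_zero hc)
      rcases List.mem_cons.mp h with he | he
      · exact ⟨x, List.mem_cons_self, Or.inl ⟨he, hmem⟩⟩
      · obtain ⟨y, hy, hcase⟩ := ih (caps.erase (PySem.Chars.upperChar x)) e htl
          (fun c hcm => hcaps c (List.mem_of_mem_erase hcm)) he
        refine ⟨y, List.mem_cons_of_mem _ hy, ?_⟩
        rcases hcase with ⟨h1, h2⟩ | h1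
        · exact Or.inl ⟨h1, List.mem_of_mem_erase h2⟩
        · exact Or.inr h1
    · rcases List.mem_cons.mp h with he | he
      · exact ⟨x, List.mem_cons_self, Or.inr he⟩
      · obtain ⟨y, hy, hcase⟩ := ih caps e htl hcaps he
        exact ⟨y, List.mem_cons_of_mem _ hy, hcase⟩

theorem soupK_upper (x : Char) (h1 : PySem.Chars.isupper (PySem.Chars.upperChar x) = true)
    (h2 : PySem.Chars.isupper x = false) : soupK (PySem.Chars.upperChar x) = 2 * x.toNat := by
  unfold soupK
  rw [isupper_eq] at h1 h2
  rw [toNat_lowerChar, islower_eq, toNat_upperChar]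
  rw [toNat_upperChar] at h1
  simp only [decide_eq_true_eq]
  simp at h1 h2
  split_ifs <;> omega

theorem soupK_self (x : Char) (h : PySem.Chars.isupper x = false) :
    soupK x = 2 * x.toNat + (if 97 ≤ x.toNat ∧ x.toNat ≤ 122 then 1 else 0) := by
  unfold soupK
  rw [isupper_eq] at h
  rw [toNat_lowerChar, islower_eq]
  simp only [decide_eq_true_eq]
  simp at h
  split_ifs <;> omega

-- The walk's output is nondecreasing in the key.
theorem pairwise_soupF (M : List Char) : ∀ caps : List Char,
    M.Pairwise (fun a b : Char => a ≤ b) →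
    (∀ c ∈ M, PySem.Chars.isupper c = false) →
    (∀ c ∈ caps, PySem.Chars.isupper c = true) →
    (soupF M caps).Pairwise (fun a b => soupK a ≤ soupK b) := by
  induction M with
  | nil => intro caps _ _ _; simp [soupF]
  | cons x t ih =>
    intro caps hs hM hcaps
    have hxu : PySem.Chars.isupper x = false := hM x List.mem_cons_self
    rcases List.pairwise_cons.mp hs with ⟨hxle, hst⟩
    have htl : ∀ c ∈ t, PySem.Chars.isupper c = false :=
      fun c hcm => hM c (List.mem_cons_of_mem _ hcm)
    simp only [soupF]
    split_ifs with hc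
    · have hmem : PySem.Chars.upperChar x ∈ caps := by
        simp only [PySem.List.count] at hc
        exact List.count_pos_iff.mp (Nat.pos_of_ne_zero hc)
      have hcaps' : ∀ c ∈ caps.erase (PySem.Chars.upperChar x), PySem.Chars.isupper c = true :=
        fun c hcm => hcaps c (List.mem_of_mem_erase hcm)
      refine List.pairwise_cons.mpr ⟨?_, ih _ hst htl hcaps'⟩
      intro e he
      obtain ⟨y, hy, hcase⟩ := mem_soupF t _ e htl hcaps' he
      have hxy : x.toNat ≤ y.toNat := (char_le_iff x y).mp (hxle y hy)
      rw [soupK_upper x (hcaps _ hmem) hxu]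
      rcases hcase with ⟨h1, h2⟩ | h1
      · rw [h1, soupK_upper y (hcaps' _ h2) (htl y hy)]
        omega
      · rw [h1, soupK_self y (htl y hy)]
        split_ifs <;> omega
    · have hnm : PySem.Chars.upperChar x ∉ caps := by
        intro hmem
        have := List.count_pos_iff.mpr hmem
        simp only [PySem.List.count] at hc
        omega
      refine List.pairwise_cons.mpr ⟨?_, ih caps hst htl hcaps⟩
      intro e he
      obtain ⟨y, hy, hcase⟩ := mem_soupF t caps e htl hcaps he
      have hxy : x.toNat ≤ y.toNat := (char_le_iff x y).mp (hxle y hy)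
      rw [soupK_self x hxu]
      rcases hcase with ⟨h1, h2⟩ | h1
      · -- e = upperChar y ∈ caps; since upperChar x ∉ caps, y ≠ x, so x < y
        have hyx : y ≠ x := by
          intro h; rw [h] at h2; exact hnm h2
        have hxylt : x.toNat < y.toNat := by
          rcases Nat.lt_or_ge x.toNat y.toNat with h | h
          · exact h
          · exfalso; apply hyx; rw [char_eq_iff]; omega
        rw [h1, soupK_upper y (hcaps _ h2) (htl y hy)]
        split_ifs <;> omega
      · rw [h1, soupK_self y (htl y hy)]
        by_cases hxyeq : x.toNat = y.toNat
        · rw [hxyeq]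
        · split_ifs <;> omega

-- Counting lowered copies: for a non-uppercase X, each original char contributes to
-- count X (map lowerChar l) iff it is X itself or (X lowercase) its uppercase twin.
theorem count_map_lower (l : List Char) (X : Char) (hX : PySem.Chars.isupper X = false) :
    (l.map PySem.Chars.lowerChar).count X =
      l.count X + (if PySem.Chars.islower X then l.count (PySem.Chars.upperChar X) else 0) := by
  induction l with
  | nil => simp
  | cons c t ih =>
    simp only [List.map_cons, List.count_cons, ih]
    have key : (if PySem.Chars.lowerChar c == X then 1 else 0) =
        (if c == X then 1 else 0) +
        (if PySem.Chars.islower X then (if c == PySem.Chars.upperChar X then 1 else 0) else 0) := by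
      rw [isupper_eq] at hX
      simp only [beq_iff_eq, char_eq_iff, toNat_lowerChar, toNat_upperChar, islower_eq,
        decide_eq_true_eq]
      simp at hX
      split_ifs <;> omega
    by_cases hl : PySem.Chars.islower X = true
    · simp only [if_pos hl] at key ⊢
      omega
    · simp only [if_neg hl] at key ⊢
      omega

-- A's output list is the consuming walk over the sorted lowered list with the capitals of s.
theorem A_eq_soupF (s : String) :
    alphabet_soup s = String.mk (soupF
      (PySem.List.sorted (PySem.Chars.lower s.toList) (fun x => x) false)
      ((PySem.List.sorted s.toList (fun x => x) false).filter PySem.Chars.isupper)) := by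
  unfold alphabet_soup
  simp only [PySem.List.foldl_append_if PySem.Chars.isupper (fun c => c), soupF_foldl,
    List.map_id_fun', id, List.nil_append]

-- The walk is a permutation of the original characters.
theorem soupF_perm (s : String) :
    (soupF (PySem.List.sorted (PySem.Chars.lower s.toList) (fun x => x) false)
      ((PySem.List.sorted s.toList (fun x => x) false).filter PySem.Chars.isupper)).Perm s.toList := by
  set M := PySem.List.sorted (PySem.Chars.lower s.toList) (fun x => x) false with hMdef
  set caps := (PySem.List.sorted s.toList (fun x => x) false).filter PySem.Chars.isupper with hcdef
  have hpermM : M.Perm (s.toList.map PySem.Chars.lowerChar) := by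
    rw [hMdef]; exact PySem.List.sorted_perm _ _ _
  have hpermli : (PySem.List.sorted s.toList (fun x => x) false).Perm s.toList :=
    PySem.List.sorted_perm _ _ _
  have hpermcaps : caps.Perm (s.toList.filter PySem.Chars.isupper) := by
    rw [hcdef]; exact hpermli.filter _
  have hM : ∀ c ∈ M, PySem.Chars.isupper c = false := by
    intro c hcm
    have : c ∈ s.toList.map PySem.Chars.lowerChar := hpermM.mem_iff.mp hcm
    obtain ⟨d, _, hd⟩ := List.mem_map.mp this
    rw [← hd, isupper_eq, toNat_lowerChar]
    simp only [decide_eq_false_iff_not]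
    split_ifs <;> omega
  have hcaps : ∀ c ∈ caps, PySem.Chars.isupper c = true := by
    intro c hcm
    exact (List.mem_filter.mp hcm).2
  have hcount_caps : ∀ U, caps.count U =
      if PySem.Chars.isupper U then s.toList.count U else 0 := by
    intro U
    rw [hpermcaps.count_eq]
    split_ifs with hU
    · exact List.count_filter hU
    · rw [List.count_eq_zero]
      intro hm
      rw [(List.mem_filter.mp hm).2] at hU
      exact hU rfl
  have hcount_M : ∀ X, M.count X = (s.toList.map PySem.Chars.lowerChar).count X :=
    fun X => hpermM.count_eq X
  have hle : ∀ U, PySem.Chars.isupper U = true →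
      caps.count U ≤ M.count (PySem.Chars.lowerChar U) := by
    intro U hU
    rw [hcount_caps, if_pos hU, hcount_M]
    calc s.toList.count U ≤ (s.toList.map PySem.Chars.lowerChar).count (PySem.Chars.lowerChar U) :=
          List.count_le_count_map
      _ = _ := rfl
  rw [List.perm_iff_count]
  intro X
  rw [count_soupF M caps hM hcaps hle X]
  split_ifs with hX
  · rw [hcount_caps, if_pos hX]
  · rw [hcount_M, hcount_caps, count_map_lower s.toList X (Bool.eq_false_iff.mpr hX)]
    have hupX : PySem.Chars.isupper (PySem.Chars.upperChar X) = PySem.Chars.islower X := by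
      rw [isupper_eq, islower_eq, toNat_upperChar]
      rw [isupper_eq] at hX
      simp at hX
      simp only [decide_eq_decide]
      split_ifs <;> omega
    rw [hupX]
    split_ifs <;> omega

-- ===== VERDICT (by name: the statement is the Claim_ definition above) =====
theorem alphabet_soup_spec : Claim_equal_alphabet_soup := by
  intro s _
  show alphabet_soup s = alphabet_soup_alt s
  rw [alt_eq_sorted, A_eq_soupF]
  congr 1
  set M := PySem.List.sorted (PySem.Chars.lower s.toList) (fun x => x) false with hMdef
  set caps := (PySem.List.sorted s.toList (fun x => x) false).filter PySem.Chars.isupper with hcdef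
  have hM : ∀ c ∈ M, PySem.Chars.isupper c = false := by
    intro c hcm
    have : c ∈ s.toList.map PySem.Chars.lowerChar :=
      ((PySem.List.sorted_perm _ _ _).mem_iff).mp hcm
    obtain ⟨d, _, hd⟩ := List.mem_map.mp this
    rw [← hd, isupper_eq, toNat_lowerChar]
    simp only [decide_eq_false_iff_not]
    split_ifs <;> omega
  have hcaps : ∀ c ∈ caps, PySem.Chars.isupper c = true := fun c hcm => (List.mem_filter.mp hcm).2
  apply PySem.List.eq_of_perm_of_pairwise_le_of_injective soupK soupK_inj
  · exact (soupF_perm s).trans ((PySem.List.sorted_perm s.toList soupK false).symm)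
  · exact pairwise_soupF M caps
      (PySem.List.sorted_pairwise (PySem.Chars.lower s.toList) (fun x : Char => x)) hM hcaps
  · exact PySem.List.sorted_pairwise s.toList soupK
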